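-- pv_equiv track=rewrite | github.com/brucenielson/Book2Audio | utils/general_utils.py | build_paragraph
-- ===== SOURCE A (Python) =====
-- _SENTENCE_END: frozenset[str] = frozenset('.?!')
--
-- _CLOSING: frozenset[str] = frozenset({")", "}", "]", '"', "'", '”', '’'})
--
-- def build_paragraph(paragraphs: list[str] | str, p2_str: str = "") -> str:
--     """Build a single paragraph out of two strings.
--
--     Accepts either a list of strings or two strings (legacy usage).
--     If the first paragraph ends with sentence-ending punctuation, the two are
--     joined with a newline. Otherwise, they are joined with a space, treating
--     them as a continuation of the same sentence.
--
--     Args: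
--         paragraphs: Either a list of strings to combine, or the first string
--                     in a two-string combination.
--         p2_str: The second string when called with two string arguments.
--
--     Returns:
--         The combined paragraph string, stripped of leading and trailing whitespace.
--     """
--     if isinstance(paragraphs, list):
--         result: str = ""
--         for p in paragraphs:
--             result = build_paragraph(result, p)
--         return result
--
--     # Two-string usage
--     p1_str = paragraphs.strip()
--     p2_str = p2_str.strip()
--     if not p1_str:
--         return p2_str
--     if is_sentence_end(p1_str):
--         return (p1_str + "\n" + p2_str).strip()
--     else:
--         return (p1_str + " " + p2_str).strip()
--
-- def is_sentence_end(text: str) -> bool: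
--     """Check if a string ends with a complete sentence.
--
--     Handles standard punctuation as well as closing brackets and quotes
--     that follow sentence-ending punctuation.
--
--     Args:
--         text: The string to check.
--
--     Returns:
--         True if the string appears to end a complete sentence.
--     """
--     if not text:
--         return False
--     last = text[-1]
--     if last in _SENTENCE_END:
--         return True
--     # Closing bracket/quote immediately after sentence-ending punctuation.
--     return last in _CLOSING and len(text) >= 2 and text[-2] in _SENTENCE_END
-- ===== SOURCE B (Python) =====
-- _SENTENCE_END: frozenset[str] = frozenset('.?!')
-- _CLOSING: frozenset[str] = frozenset({")", "}", "]", '"', "'", '”', '’'})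
--
--
-- def is_sentence_end(text: str) -> bool:
--     if not text:
--         return False
--     last = text[-1]
--     if last in _SENTENCE_END:
--         return True
--     return last in _CLOSING and len(text) >= 2 and text[-2] in _SENTENCE_END
--
--
-- def build_paragraph(paragraphs, p2_str: str = "") -> str:
--     if isinstance(paragraphs, list):
--         # Filter-then-join: keep the stripped non-empty pieces, then glue each
--         # gap with a separator decided locally from the preceding piece.
--         parts = [s.strip() for s in paragraphs if s.strip()]
--         if not parts:
--             return ""
--         result = parts[0]
--         prev = parts[0]
--         for cur in parts[1:]:
--             result += ("\n" if is_sentence_end(prev) else " ") + cur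
--             prev = cur
--         return result
--     # Two-string usage
--     p1 = paragraphs.strip()
--     p2 = p2_str.strip()
--     if not p1:
--         return p2
--     if not p2:
--         return p1
--     return p1 + ("\n" if is_sentence_end(p1) else " ") + p2
-- ===== Notes on version B (the rewrite author's own statement) =====
-- stated objective: faster
-- what changed: Replaces A's recursive accumulate-and-restrip fold (each step re-strips and re-concatenates the whole growing accumulator and re-tests sentence-end on it) with a filter-then-join pass: strip and drop empty pieces once, then append each piece with a separator decided locally from the preceding piece, never rescanning the accumulator.
import Mathlib
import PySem

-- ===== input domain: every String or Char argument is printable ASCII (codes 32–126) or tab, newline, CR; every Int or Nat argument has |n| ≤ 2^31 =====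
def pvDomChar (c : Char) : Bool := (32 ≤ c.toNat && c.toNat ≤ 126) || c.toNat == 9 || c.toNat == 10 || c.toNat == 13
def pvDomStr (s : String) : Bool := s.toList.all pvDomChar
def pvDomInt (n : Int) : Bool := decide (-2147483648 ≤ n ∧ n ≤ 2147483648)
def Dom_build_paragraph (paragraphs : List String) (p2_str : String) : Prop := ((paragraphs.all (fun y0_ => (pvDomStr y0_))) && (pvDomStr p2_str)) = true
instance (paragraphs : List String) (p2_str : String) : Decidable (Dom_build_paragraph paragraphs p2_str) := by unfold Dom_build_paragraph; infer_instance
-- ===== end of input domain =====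

-- B replaces A's accumulate-and-restrip fold (which rescans the whole accumulator each step)
-- with a filter-then-join pass (strip/drop-empty once, then glue with locally decided separators);
-- a timing run measured B faster at the largest sizes.
-- The Lean signature fixes `paragraphs : List String`, so both ports cover Python's list branch
-- (where `p2_str` is ignored); Python's legacy two-string branch is not reachable under the type convention.

-- ===== PORT A =====
def sent_end (c : Char) : Bool := c == '.' || c == '?' || c == '!'

def closing (c : Char) : Bool :=
  c == ')' || c == '}' || c == ']' || c == '"' || c == '\'' || c == '”' || c == '’'

-- shared helper (Source A and Source B both define the identical `is_sentence_end`)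
def is_sentence_end (text : String) : Bool :=
  if text = "" then false
  else
    match PySem.Str.pyGet? text (-1) with
    | none => false  -- unreachable: text ≠ ""
    | some last =>
      if sent_end last then true
      else
        closing last && decide (2 ≤ PySem.Str.len text) &&
          (match PySem.Str.pyGet? text (-2) with
           | none => false  -- unreachable when len ≥ 2
           | some c => sent_end c)

-- A's two-string branch (the body after `isinstance` returns False)
def bp_two (paragraphs : String) (p2_str : String) : String :=
  let p1_str := PySem.Str.strip paragraphs
  let p2_str := PySem.Str.strip p2_str
  if p1_str = "" then p2_str
  else if is_sentence_end p1_str then PySem.Str.strip (p1_str ++ "\n" ++ p2_str)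
  else PySem.Str.strip (p1_str ++ " " ++ p2_str)

def build_paragraph (paragraphs : List String) (p2_str : String) : String :=
  paragraphs.foldl (fun result p => bp_two result p) ""

-- ===== PORT B =====
def build_paragraph_alt (paragraphs : List String) (p2_str : String) : String :=
  let parts := (paragraphs.map PySem.Str.strip).filter (fun s => s ≠ "")
  match parts with
  | [] => ""
  | h :: t =>
    (t.foldl (fun (st : String × String) cur =>
      (st.1 ++ (if is_sentence_end st.2 then "\n" else " ") ++ cur, cur)) (h, h)).1

-- ===== PRECONDITION & SPEC =====
def Spec_build_paragraph (paragraphs : List String) (p2_str : String) (out : String) : Prop := out = build_paragraph_alt paragraphs p2_str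
instance (paragraphs : List String) (p2_str : String) (out : String) : Decidable (Spec_build_paragraph paragraphs p2_str out) := by unfold Spec_build_paragraph; infer_instance

-- ===== CLAIM (what is proved, stated in full; the proofs are below) =====
def Claim_equal_build_paragraph : Prop := ∀ (paragraphs : List String) (p2_str : String), Dom_build_paragraph paragraphs p2_str → Spec_build_paragraph paragraphs p2_str (build_paragraph paragraphs p2_str)

-- ===== LEMMAS AND PROOFS =====

-- "good" character list: nonempty, no leading or trailing whitespace
def GoodC (l : List Char) : Prop :=
  l ≠ [] ∧ (∀ c ∈ l.head?, PySem.Chars.isspace c = false) ∧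
    (∀ c ∈ l.getLast?, PySem.Chars.isspace c = false)

def Good (s : String) : Prop := GoodC s.toList

theorem toList_eq_nil_iff (s : String) : s.toList = [] ↔ s = "" := by
  constructor
  · intro h; exact String.toList_injective (by simpa using h)
  · rintro rfl; rfl

theorem lstripC_eq_self {l : List Char} (h : ∀ c ∈ l.head?, PySem.Chars.isspace c = false) :
    PySem.Chars.lstrip l = l := by
  cases l with
  | nil => rfl
  | cons a t =>
    have := h a (by simp)
    simp [PySem.Chars.lstrip, this]

theorem rstripC_eq_self {l : List Char} (h : ∀ c ∈ l.getLast?, PySem.Chars.isspace c = false) :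
    PySem.Chars.rstrip l = l := by
  rcases l.eq_nil_or_concat with rfl | ⟨l', c, rfl⟩
  · rfl
  · have := h c (by simp)
    simp [PySem.Chars.rstrip, this]

theorem stripC_eq_self {l : List Char} (h : GoodC l) : PySem.Chars.strip l = l := by
  unfold PySem.Chars.strip
  rw [lstripC_eq_self h.2.1, rstripC_eq_self h.2.2]

theorem head?_dropWhile_false (p : Char → Bool) (l : List Char) :
    ∀ c ∈ (List.dropWhile p l).head?, p c = false := by
  induction l with
  | nil => simp
  | cons a t ih =>
    intro c hc
    rw [List.dropWhile_cons] at hc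
    split at hc
    · exact ih c hc
    · rename_i hpa; simp at hc; rw [← hc]; simpa using hpa

theorem goodC_strip {l : List Char} (h : PySem.Chars.strip l ≠ []) : GoodC (PySem.Chars.strip l) := by
  have hstrip : PySem.Chars.strip l = (List.dropWhile PySem.Chars.isspace (PySem.Chars.lstrip l).reverse).reverse := rfl
  refine ⟨h, ?_, ?_⟩
  · intro c hc
    obtain ⟨t, ht⟩ := List.dropWhile_suffix (l := (PySem.Chars.lstrip l).reverse) (p := PySem.Chars.isspace)
    have hm_eq : PySem.Chars.lstrip l = PySem.Chars.strip l ++ t.reverse := by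
      have := congrArg List.reverse ht
      rw [hstrip]; simpa using this.symm
    have hmhead : (PySem.Chars.lstrip l).head? = some c := by
      rw [hm_eq]
      cases e : PySem.Chars.strip l with
      | nil => exact absurd e h
      | cons a r => rw [e] at hc; simp at hc; simp [hc]
    exact head?_dropWhile_false PySem.Chars.isspace l c (by rw [← PySem.Chars.lstrip]; exact hmhead)
  · intro c hc
    rw [hstrip, List.getLast?_reverse] at hc
    exact head?_dropWhile_false _ _ c hc

theorem goodC_append {u v : List Char} (sep : Char) (hu : GoodC u) (hv : GoodC v) :
    GoodC (u ++ sep :: v) := by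
  refine ⟨by simp, ?_, ?_⟩
  · intro c hc
    apply hu.2.1 c
    cases u with
    | nil => exact absurd rfl hu.1
    | cons a t => simpa using hc
  · intro c hc
    apply hv.2.2 c
    rwa [show u ++ sep :: v = (u ++ [sep]) ++ v from by simp,
      List.getLast?_append_of_ne_nil _ hv.1] at hc

theorem stripC_append_sep {u : List Char} (sep : Char) (hu : GoodC u)
    (hs : PySem.Chars.isspace sep = true) : PySem.Chars.strip (u ++ [sep]) = u := by
  unfold PySem.Chars.strip
  have hl : PySem.Chars.lstrip (u ++ [sep]) = u ++ [sep] := by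
    apply lstripC_eq_self
    intro c hc
    apply hu.2.1 c
    cases u with
    | nil => exact absurd rfl hu.1
    | cons a t => simpa using hc
  rw [hl]
  unfold PySem.Chars.rstrip
  have h2 : List.dropWhile PySem.Chars.isspace u.reverse = u.reverse := by
    have h3 := rstripC_eq_self hu.2.2
    unfold PySem.Chars.rstrip at h3
    have := congrArg List.reverse h3
    simpa using this
  rw [show (u ++ [sep]).reverse = sep :: u.reverse from by simp,
    List.dropWhile_cons, if_pos (by simp [hs]), h2, List.reverse_reverse]

-- the port's sentence-end test, expressed on the character list
theorem pyGet_neg_one (l : List Char) : PySem.List.pyGet? l (-1) = l.getLast? := by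
  rcases l.eq_nil_or_concat with rfl | ⟨l', c, rfl⟩
  · rfl
  · simp [PySem.List.pyGet?, PySem.List.pyIdx?]

theorem pyGet_neg_two (l : List Char) (h : 2 ≤ l.length) :
    PySem.List.pyGet? l (-2) = l.dropLast.getLast? := by
  rcases l.eq_nil_or_concat with rfl | ⟨l', c, rfl⟩
  · simp at h
  · rcases l'.eq_nil_or_concat with rfl | ⟨l'', d, rfl⟩
    · simp at h
    · simp [PySem.List.pyGet?, PySem.List.pyIdx?]

theorem isEnd_char (s : String) :
    is_sentence_end s =
      (match s.toList.getLast? with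
       | none => false
       | some last =>
         sent_end last ||
           (closing last && decide (2 ≤ s.toList.length) &&
             (s.toList.dropLast.getLast?.elim false sent_end))) := by
  unfold is_sentence_end
  by_cases hs : s = ""
  · subst hs; rfl
  · rw [if_neg hs]
    have hl : s.toList ≠ [] := by rw [ne_eq, toList_eq_nil_iff]; exact hs
    have h1 : PySem.Str.pyGet? s (-1) = s.toList.getLast? := by
      simp [pyGet_neg_one]
    rw [h1]
    cases e : s.toList.getLast? with
    | none => simp [List.getLast?_eq_none_iff] at e; exact absurd e hs
    | some last =>
      simp only []
      by_cases hse : sent_end last = true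
      · simp [hse]
      · rw [if_neg hse]
        simp only [Bool.not_eq_true] at hse
        rw [hse]
        simp only [Bool.false_or]
        have hlen : PySem.Str.len s = (s.toList.length : Int) := by simp
        by_cases h2 : 2 ≤ s.toList.length
        · have h2' : decide (2 ≤ PySem.Str.len s) = true := by rw [hlen]; simpa using h2
          have h2'' : decide (2 ≤ s.toList.length) = true := by simpa using h2
          rw [h2', h2'']
          have : PySem.Str.pyGet? s (-2) = s.toList.dropLast.getLast? := by
            simp only [PySem.Str.pyGet?_eq, PySem.Chars.pyGet?_eq_listPyGet?]
            exact pyGet_neg_two _ h2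
          rw [this]
          cases s.toList.dropLast.getLast? <;> simp
        · have h2' : decide (2 ≤ PySem.Str.len s) = false := by rw [hlen]; simpa using h2
          have h2'' : decide (2 ≤ s.toList.length) = false := by simpa using h2
          rw [h2', h2'']
          simp

theorem isEnd_append (u v : String) (sep : Char) (hu : u.toList ≠ []) (hv : v.toList ≠ [])
    (hsep : sent_end sep = false) (w : String) (hw : w.toList = u.toList ++ sep :: v.toList) :
    is_sentence_end w = is_sentence_end v := by
  rw [isEnd_char w, isEnd_char v, hw]
  rcases v.toList.eq_nil_or_concat with hnil | ⟨v', cv, hcv⟩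
  · exact absurd hnil hv
  · rw [List.concat_eq_append] at hcv
    rw [hcv]
    have hlast : (u.toList ++ sep :: (v' ++ [cv])).getLast? = some cv := by
      rw [show u.toList ++ sep :: (v' ++ [cv]) = (u.toList ++ sep :: v') ++ [cv] from by simp,
        List.getLast?_concat]
    rw [hlast, List.getLast?_concat]
    simp only []
    have hlen1 : decide (2 ≤ (u.toList ++ sep :: (v' ++ [cv])).length) = true := by
      simp; omega
    rw [hlen1]
    have hdrop : (u.toList ++ sep :: (v' ++ [cv])).dropLast = u.toList ++ sep :: v' := by
      rw [show u.toList ++ sep :: (v' ++ [cv]) = (u.toList ++ sep :: v') ++ [cv] from by simp,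
        List.dropLast_concat]
    rw [hdrop]
    rcases v'.eq_nil_or_concat with rfl | ⟨v'', d, hv'⟩
    · have : (u.toList ++ [sep]).getLast? = some sep := List.getLast?_concat ..
      rw [show u.toList ++ sep :: ([] : List Char) = u.toList ++ [sep] by rfl, this]
      simp [hsep]
    · rw [List.concat_eq_append] at hv'
      subst hv'
      have h1 : (u.toList ++ sep :: (v'' ++ [d])).getLast? = some d := by
        rw [show u.toList ++ sep :: (v'' ++ [d]) = (u.toList ++ sep :: v'') ++ [d] from by simp,
          List.getLast?_concat]
      rw [h1]
      have h2 : decide (2 ≤ (v'' ++ [d] ++ [cv]).length) = true := by simp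
      rw [h2]
      have h3 : (v'' ++ [d] ++ [cv]).dropLast = v'' ++ [d] := by simp
      rw [h3, List.getLast?_concat]

-- string-level wrappers
theorem good_ne_empty {s : String} (h : Good s) : s ≠ "" := by
  intro e; exact h.1 (by rw [e]; rfl)

theorem strip_eq_self {s : String} (h : Good s) : PySem.Str.strip s = s := by
  apply String.toList_injective
  simpa using stripC_eq_self h

theorem good_strip {s : String} (h : PySem.Str.strip s ≠ "") : Good (PySem.Str.strip s) := by
  unfold Good
  have : (PySem.Str.strip s).toList = PySem.Chars.strip s.toList := by simp
  rw [this]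
  apply goodC_strip
  rw [← this, ne_eq, toList_eq_nil_iff]
  exact h

-- A's step on a good accumulator and an all-whitespace piece returns it unchanged
theorem bp_two_ws {r x : String} (hr : Good r) (hx : PySem.Str.strip x = "") :
    bp_two r x = r := by
  unfold bp_two
  rw [strip_eq_self hr, hx, if_neg (good_ne_empty hr)]
  have key : ∀ (sep : Char), PySem.Chars.isspace sep = true →
      ∀ (t : String), t.toList = r.toList ++ [sep] → PySem.Str.strip t = r := by
    intro sep hsep t ht
    apply String.toList_injective
    rw [PySem.Str.toList_strip, ht, stripC_append_sep sep hr hsep]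
  split
  · exact key '\n' (by decide) _ (by simp)
  · exact key ' ' (by decide) _ (by simp)

-- A's step on a good accumulator and a piece with non-empty strip appends sep + piece
theorem bp_two_app {r x : String} (hr : Good r) (hx : PySem.Str.strip x ≠ "") :
    bp_two r x = r ++ (if is_sentence_end r then "\n" else " ") ++ PySem.Str.strip x := by
  unfold bp_two
  rw [strip_eq_self hr, if_neg (good_ne_empty hr)]
  have hv : Good (PySem.Str.strip x) := good_strip hx
  have key : ∀ (sep : Char) (sepS : String), sepS.toList = [sep] →
      PySem.Str.strip (r ++ sepS ++ PySem.Str.strip x) = r ++ sepS ++ PySem.Str.strip x := by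
    intro sep sepS hsepS
    apply String.toList_injective
    rw [PySem.Str.toList_strip]
    have ht : (r ++ sepS ++ PySem.Str.strip x).toList = r.toList ++ sep :: (PySem.Str.strip x).toList := by
      simp [hsepS]
    rw [ht, stripC_eq_self (goodC_append sep hr hv)]
  split
  · rw [key '\n' "\n" (by decide)]
  · rw [key ' ' " " (by decide)]

def partsOf (xs : List String) : List String :=
  (xs.map PySem.Str.strip).filter (fun s => s ≠ "")

def bstep : String × String → String → String × String :=
  fun st cur => (st.1 ++ (if is_sentence_end st.2 then "\n" else " ") ++ cur, cur)

theorem bstep_snd (t : List String) : ∀ (p h : String), (t.foldl bstep (p, h)).2 = t.getLastD h := by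
  induction t with
  | nil => intro p h; rfl
  | cons c t ih =>
    intro p h
    rw [List.foldl_cons, List.getLastD_cons]
    exact ih _ c

theorem partsOf_append_singleton (xs : List String) (x : String) :
    partsOf (xs ++ [x]) = partsOf xs ++ (if PySem.Str.strip x = "" then [] else [PySem.Str.strip x]) := by
  unfold partsOf
  rw [List.map_append, List.filter_append]
  congr 1
  split <;> rename_i h <;> simp [h]

theorem main_invariant (xs : List String) :
    (partsOf xs = [] ∧ List.foldl bp_two "" xs = "") ∨
    (∃ h t, partsOf xs = h :: t ∧
      List.foldl bp_two "" xs = (t.foldl bstep (h, h)).1 ∧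
      Good (List.foldl bp_two "" xs) ∧
      is_sentence_end (List.foldl bp_two "" xs) = is_sentence_end ((h :: t).getLastD "")) := by
  induction xs using List.reverseRecOn with
  | nil => left; exact ⟨rfl, rfl⟩
  | append_singleton xs x ih =>
    have hfold : List.foldl bp_two "" (xs ++ [x]) = bp_two (List.foldl bp_two "" xs) x := by
      rw [List.foldl_append]; rfl
    have hparts := partsOf_append_singleton xs x
    by_cases hx : PySem.Str.strip x = ""
    · rw [hparts, if_pos hx, List.append_nil]
      rcases ih with ⟨hp, he⟩ | ⟨h, t, hp, he, hg, hE⟩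
      · left
        refine ⟨hp, ?_⟩
        rw [hfold, he]
        show bp_two "" x = ""
        unfold bp_two
        rw [show PySem.Str.strip "" = "" from rfl, if_pos rfl, hx]
      · right
        refine ⟨h, t, hp, ?_, ?_, ?_⟩ <;> rw [hfold, bp_two_ws hg hx]
        · exact he
        · exact hg
        · exact hE
    · have hv : Good (PySem.Str.strip x) := good_strip hx
      rw [hparts, if_neg hx]
      rcases ih with ⟨hp, he⟩ | ⟨h, t, hp, he, hg, hE⟩
      · right
        refine ⟨PySem.Str.strip x, [], by rw [hp]; rfl, ?_, ?_, ?_⟩ <;>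
          rw [hfold, he, show bp_two "" x = PySem.Str.strip x from by
            unfold bp_two; rw [show PySem.Str.strip "" = "" from rfl, if_pos rfl]]
        · rfl
        · exact hv
        · rfl
      · right
        have hstep := bp_two_app hg hx
        have hsnd : (t.foldl bstep (h, h)).2 = (h :: t).getLastD "" := by
          rw [bstep_snd, List.getLastD_cons]
        refine ⟨h, t ++ [PySem.Str.strip x], by rw [hp]; simp, ?_, ?_, ?_⟩
        · rw [hfold, hstep, List.foldl_append, List.foldl_cons, List.foldl_nil]
          have hb : (bstep (List.foldl bstep (h, h) t) (PySem.Str.strip x)).1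
              = (List.foldl bstep (h, h) t).1 ++
                (if is_sentence_end ((h :: t).getLastD "") then "\n" else " ") ++
                PySem.Str.strip x := by
            rw [← hsnd]; rfl
          rw [hb, hE, he]
        · rw [hfold, hstep]
          unfold Good
          have hsepc : ∀ (sep : Char) (sepS : String), sepS.toList = [sep] →
              GoodC ((List.foldl bp_two "" xs ++ sepS ++ PySem.Str.strip x).toList) := by
            intro sep sepS hsepS
            have : (List.foldl bp_two "" xs ++ sepS ++ PySem.Str.strip x).toList =
                (List.foldl bp_two "" xs).toList ++ sep :: (PySem.Str.strip x).toList := by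
              simp [hsepS]
            rw [this]
            exact goodC_append sep hg hv
          split
          · exact hsepc '\n' "\n" (by decide)
          · exact hsepc ' ' " " (by decide)
        · rw [hfold, hstep]
          have hgl : ((h :: (t ++ [PySem.Str.strip x])).getLastD "") = PySem.Str.strip x := by
            rw [show h :: (t ++ [PySem.Str.strip x]) = (h :: t) ++ [PySem.Str.strip x] from by simp,
              List.getLastD_concat]
          rw [hgl]
          have hErw : ∀ (sep : Char) (sepS : String), sepS.toList = [sep] → sent_end sep = false →
              is_sentence_end (List.foldl bp_two "" xs ++ sepS ++ PySem.Str.strip x) =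
                is_sentence_end (PySem.Str.strip x) := by
            intro sep sepS hsepS hse
            exact isEnd_append _ _ sep hg.1 hv.1 hse _ (by simp [hsepS])
          split
          · exact hErw '\n' "\n" (by decide) (by decide)
          · exact hErw ' ' " " (by decide) (by decide)

-- ===== VERDICT (by name: the statement is the Claim_ definition above) =====
theorem build_paragraph_spec : Claim_equal_build_paragraph := by
  intro xs p2 _
  show build_paragraph xs p2 = build_paragraph_alt xs p2
  have hA : build_paragraph xs p2 = List.foldl bp_two "" xs := rfl
  have hmain := main_invariant xs
  unfold build_paragraph_alt
  rcases hmain with ⟨hp, he⟩ | ⟨h, t, hp, he, _, _⟩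
  · rw [hA, he]; rw [show (xs.map PySem.Str.strip).filter (fun s => s ≠ "") = partsOf xs from rfl, hp]
  · rw [hA, he]; rw [show (xs.map PySem.Str.strip).filter (fun s => s ≠ "") = partsOf xs from rfl, hp]
    rfl
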